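-- pv_equiv track=rewrite | github.com/ileenf/Data-Structures-Algos | Prefix Sum/k_prefix.py | solve
-- ===== SOURCE A (Python) =====
-- def solve(nums, k):
--     prefixes = [0]
--
--     total = 0
--     for num in nums:
--         total += num
--         prefixes.append(total)
--
--
--     for i in range(len(prefixes)-1, 0, -1):
--         if prefixes[i] <= k:
--             return i - 1
--     return -1
-- ===== SOURCE B (Python) =====
-- def solve(nums, k):
--     total = 0
--     result = -1
--     for i, num in enumerate(nums):
--         total += num
--         if total <= k:
--             result = i
--     return result
-- ===== Notes on version B (the rewrite author's own statement) =====
-- stated objective: simpler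
-- what changed: Replaces A's two-phase 'build the full prefix-sum list, then scan it backward' with a single forward pass keeping only a running total and the last qualifying index (last-write-wins).
import Mathlib
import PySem

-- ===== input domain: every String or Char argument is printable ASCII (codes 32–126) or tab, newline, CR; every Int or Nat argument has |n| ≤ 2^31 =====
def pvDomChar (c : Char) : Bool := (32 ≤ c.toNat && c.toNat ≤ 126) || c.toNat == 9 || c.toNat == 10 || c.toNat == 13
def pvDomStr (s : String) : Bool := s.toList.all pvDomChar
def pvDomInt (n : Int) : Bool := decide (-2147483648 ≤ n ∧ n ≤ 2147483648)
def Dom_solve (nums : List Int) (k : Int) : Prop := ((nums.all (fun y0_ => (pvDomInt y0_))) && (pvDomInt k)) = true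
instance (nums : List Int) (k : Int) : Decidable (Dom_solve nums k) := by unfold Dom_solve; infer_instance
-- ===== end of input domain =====

-- B replaces A's two-phase "build the full prefix-sum list, then scan it backward" with a
-- single forward pass keeping only a running total and the last qualifying index (simpler).

-- ===== PORT A =====
-- first loop of A: build the prefix-sum list together with the running total
def solveBuild (nums : List Int) : List Int × Int :=
  nums.foldl (fun (st : List Int × Int) num =>
    let total := st.2 + num
    (st.1 ++ [total], total)) ([0], 0)

-- second loop of A: scan the index list, return i-1 at the first prefix ≤ k
-- (the indices produced by A's range are always in range, so the default 0 of pyGetD is never used)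
def solveScan (prefixes : List Int) (k : Int) : List Int → Int
  | [] => -1
  | i :: rest =>
      if PySem.List.pyGetD prefixes i 0 ≤ k then i - 1 else solveScan prefixes k rest

def solve (nums : List Int) (k : Int) : Int :=
  let prefixes := (solveBuild nums).1
  solveScan prefixes k (PySem.List.pyRange ((prefixes.length : Int) - 1) 0 (-1))

-- ===== PORT B =====
def solve_alt (nums : List Int) (k : Int) : Int :=
  ((PySem.List.enumerate nums).foldl
    (fun (st : Int × Int) (p : Int × Int) =>
      let total := st.1 + p.2
      (total, if total ≤ k then p.1 else st.2)) (0, -1)).2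

-- ===== PRECONDITION & SPEC =====
def Spec_solve (nums : List Int) (k : Int) (out : Int) : Prop := out = solve_alt nums k
instance (nums : List Int) (k : Int) (out : Int) : Decidable (Spec_solve nums k out) := by unfold Spec_solve; infer_instance

-- ===== CLAIM (what is proved, stated in full; the proofs are below) =====
def Claim_equal_solve : Prop := ∀ (nums : List Int) (k : Int), Dom_solve nums k → Spec_solve nums k (solve nums k)

-- ===== LEMMAS AND PROOFS =====

theorem solveBuild_concat (xs : List Int) (x : Int) :
    solveBuild (xs ++ [x]) =
      ((solveBuild xs).1 ++ [(solveBuild xs).2 + x], (solveBuild xs).2 + x) := by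
  simp [solveBuild, List.foldl_append]

theorem solveBuild_snd (xs : List Int) : (solveBuild xs).2 = xs.sum := by
  induction xs using List.reverseRecOn with
  | nil => simp [solveBuild]
  | append_singleton xs x ih => simp [solveBuild_concat, ih]

theorem solveBuild_length (xs : List Int) : (solveBuild xs).1.length = xs.length + 1 := by
  induction xs using List.reverseRecOn with
  | nil => simp [solveBuild]
  | append_singleton xs x ih => simp [solveBuild_concat, ih]

-- appending one more prefix does not change the scan as long as every index stays in range
theorem solveScan_append (ps : List Int) (t k : Int) (is : List Int)
    (h : ∀ i ∈ is, 0 ≤ i ∧ i < (ps.length : Int)) :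
    solveScan (ps ++ [t]) k is = solveScan ps k is := by
  induction is with
  | nil => rfl
  | cons i rest ih =>
      obtain ⟨h0, hlt⟩ := h i (by simp)
      have hget : PySem.List.pyGetD (ps ++ [t]) i 0 = PySem.List.pyGetD ps i 0 := by
        rw [PySem.List.pyGetD_eq_getElem _ 0 h0 (by simp; omega),
            PySem.List.pyGetD_eq_getElem _ 0 h0 (by omega),
            List.getElem_append_left (by omega)]
      simp only [solveScan, hget]
      split
      · rfl
      · exact ih (fun j hj => h j (by simp [hj]))

theorem solve_concat (xs : List Int) (x k : Int) :
    solve (xs ++ [x]) k = if xs.sum + x ≤ k then (xs.length : Int) else solve xs k := by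
  have hlen := solveBuild_length xs
  have hcat := solveBuild_concat xs x
  have hsnd := solveBuild_snd xs
  simp only [solve, hcat, hsnd, List.length_append, List.length_singleton, hlen]
  have hrange : (((xs.length + 1 + 1 : Nat) : Int) - 1) = (xs.length : Int) + 1 := by
    push_cast; ring
  rw [hrange, PySem.List.pyRange_neg_one_cons (by omega)]
  have hget : PySem.List.pyGetD ((solveBuild xs).1 ++ [xs.sum + x]) ((xs.length : Int) + 1) 0
      = xs.sum + x := by
    have hL : (((solveBuild xs).1 ++ [xs.sum + x]).length : Int) = (xs.length : Int) + 2 := by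
      simp [hlen]; ring
    rw [PySem.List.pyGetD_eq_getElem _ 0 (by omega) (by omega)]
    have h1 : ((xs.length : Int) + 1).toNat = xs.length + 1 := by omega
    simp [h1, hlen]
  simp only [solveScan, hget]
  split
  · omega
  · rw [solveScan_append _ _ _ _ (fun i hi => by
        rw [PySem.List.mem_pyRange_neg_one] at hi
        constructor <;> omega)]
    have h2 : ((xs.length : Int) + 1 - 1) = ((xs.length + 1 : Nat) : Int) - 1 := by
      push_cast; ring
    rw [h2]

theorem solve_alt_fst (xs : List Int) (k : Int) (s t r : Int) :
    ((PySem.List.enumerate xs s).foldl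
      (fun (st : Int × Int) (p : Int × Int) =>
        (st.1 + p.2, if st.1 + p.2 ≤ k then p.1 else st.2)) (t, r)).1 = t + xs.sum := by
  induction xs generalizing s t r with
  | nil => simp [PySem.List.enumerate_nil]
  | cons y ys ih => simp [PySem.List.enumerate_cons, List.foldl_cons, ih]; ring

theorem solve_alt_concat (xs : List Int) (x k : Int) :
    solve_alt (xs ++ [x]) k =
      if xs.sum + x ≤ k then (xs.length : Int) else solve_alt xs k := by
  have henum : PySem.List.enumerate (xs ++ [x]) 0
      = PySem.List.enumerate xs 0 ++ [((xs.length : Int), x)] := by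
    rw [PySem.List.enumerate_append]
    simp [PySem.List.enumerate_cons, PySem.List.enumerate_nil]
  simp only [solve_alt, henum, List.foldl_append, List.foldl_cons, List.foldl_nil]
  rw [solve_alt_fst xs k 0 0 (-1)]
  simp

theorem solve_eq (xs : List Int) (k : Int) : solve xs k = solve_alt xs k := by
  induction xs using List.reverseRecOn with
  | nil =>
      simp [solve, solve_alt, solveBuild, solveScan, PySem.List.enumerate_nil,
        PySem.List.pyRange_neg_one_eq_nil]
  | append_singleton xs x ih => rw [solve_concat, solve_alt_concat, ih]

-- ===== VERDICT (by name: the statement is the Claim_ definition above) =====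
theorem solve_spec : Claim_equal_solve := by
  intro nums k _
  exact solve_eq nums k
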